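-- pv_equiv track=rewrite | github.com/bubpen/codekata | 프로그래머스/1/12982. 예산/예산.py | solution
-- ===== SOURCE A (Python) =====
-- def solution(d, budget):
--     answer = 0
--     d.sort()
--     for dep in d:
--         budget -= dep
--         if budget < 0:
--             break
--         else:
--             answer += 1
--     return answer
-- ===== SOURCE B (Python) =====
-- def solution(d, budget):
--     # Selection-based: repeatedly extract the minimum remaining cost, no sort.
--     # Side effect differs from A: A sorts d in place, B leaves d untouched.
--     remaining = list(d)
--     answer = 0
--     while remaining:
--         m = min(remaining)
--         if budget - m < 0:
--             break
--         budget -= m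
--         remaining.remove(m)
--         answer += 1
--     return answer
-- ===== Notes on version B (the rewrite author's own statement) =====
-- stated objective: alternative
-- what changed: Replaces sort-then-scan by selection: repeatedly extract min(remaining) and fund it while it fits, so no sorted order is ever materialised (A sorts d in place, B leaves d unmodified).
import Mathlib
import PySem

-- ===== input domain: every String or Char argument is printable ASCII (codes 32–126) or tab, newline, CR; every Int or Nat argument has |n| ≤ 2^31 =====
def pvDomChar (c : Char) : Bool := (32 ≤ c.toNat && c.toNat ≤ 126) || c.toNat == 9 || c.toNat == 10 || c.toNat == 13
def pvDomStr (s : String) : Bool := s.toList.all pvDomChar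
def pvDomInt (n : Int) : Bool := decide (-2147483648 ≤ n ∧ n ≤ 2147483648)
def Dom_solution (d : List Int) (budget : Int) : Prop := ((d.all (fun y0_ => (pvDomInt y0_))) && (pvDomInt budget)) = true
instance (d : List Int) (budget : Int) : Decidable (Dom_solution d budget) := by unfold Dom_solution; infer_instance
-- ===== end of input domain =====

-- B funds departments by repeated min-extraction instead of A's sort-then-scan; return values agree, but A sorts d in place while B leaves d unmodified (return-value equivalence only).


-- ===== PORT A =====
-- A's for-loop with break over the sorted list, carrying (budget, answer).
def solLoopA : List Int → Int → Int → Int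
  | [], _, answer => answer
  | dep :: rest, budget, answer =>
    if budget - dep < 0 then answer else solLoopA rest (budget - dep) (answer + 1)

def solution (d : List Int) (budget : Int) : Int :=
  solLoopA (PySem.List.sorted d (fun x => x) false) budget 0

-- ===== PORT B =====
-- B's while loop: m = min(remaining); stop if it does not fit, else remove it and count.
-- remaining.remove(m) is exact as List.erase m since m ∈ remaining (PySem.List.remove?_eq_some_erase).
def solLoopB (l : List Int) (budget answer : Int) : Int :=
  match hm : PySem.List.min? l (fun x => x) with
  | none => answer
  | some m =>
    if budget - m < 0 then answer
    else solLoopB (l.erase m) (budget - m) (answer + 1)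
termination_by l.length
decreasing_by
  have h : m ∈ l := PySem.List.min?_mem hm
  have := List.length_erase_of_mem h
  have := List.length_pos_of_mem h
  omega

def solution_alt (d : List Int) (budget : Int) : Int := solLoopB d budget 0

-- ===== PRECONDITION & SPEC =====
def Spec_solution (d : List Int) (budget : Int) (out : Int) : Prop := out = solution_alt d budget
instance (d : List Int) (budget : Int) (out : Int) : Decidable (Spec_solution d budget out) := by unfold Spec_solution; infer_instance

-- ===== CLAIM (what is proved, stated in full; the proofs are below) =====
def Claim_equal_solution : Prop := ∀ (d : List Int) (budget : Int), Dom_solution d budget → Spec_solution d budget (solution d budget)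

-- ===== LEMMAS AND PROOFS =====
-- sorted l = m :: sorted (l.erase m) when m is the minimum of l
theorem sorted_eq_min_cons (l : List Int) (m : Int)
    (hm : PySem.List.min? l (fun x => x) = some m) :
    PySem.List.sorted l (fun x => x) false = m :: PySem.List.sorted (l.erase m) (fun x => x) false := by
  have hmem : m ∈ l := PySem.List.min?_mem hm
  have hmin : ∀ y ∈ l, m ≤ y := fun y hy => PySem.List.min?_isMin hm y hy
  apply PySem.List.sorted_id_eq_of_perm_of_pairwise
  · exact ((PySem.List.sorted_perm (l.erase m) (fun x => x) false).cons m).trans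
      (l.perm_cons_erase hmem).symm
  · refine List.pairwise_cons.mpr ⟨?_, ?_⟩
    · intro y hy
      exact hmin y (l.erase_subset ((PySem.List.mem_sorted (l.erase m) (fun x => x) false y).mp hy))
    · exact PySem.List.sorted_pairwise (l.erase m) (fun x => x)

theorem solLoopB_eq (l : List Int) (b a : Int) :
    solLoopB l b a = solLoopA (PySem.List.sorted l (fun x => x) false) b a := by
  induction hn : l.length using Nat.strong_induction_on generalizing l b a with
  | _ n ih =>
    rw [solLoopB]
    cases hm : PySem.List.min? l (fun x => x) with
    | none =>
      have : l = [] := (PySem.List.min?_eq_none_iff l (fun x => x)).mp hm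
      subst this
      simp [solLoopA, PySem.List.sorted]
    | some m =>
      rw [sorted_eq_min_cons l m hm]
      simp only [solLoopA]
      split
      · rfl
      · have hmem : m ∈ l := PySem.List.min?_mem hm
        have hlt : (l.erase m).length < n := by
          have := List.length_erase_of_mem hmem
          have := List.length_pos_of_mem hmem
          omega
        exact ih _ hlt _ _ _ rfl

-- ===== VERDICT (by name: the statement is the Claim_ definition above) =====
theorem solution_spec : Claim_equal_solution := by
  intro d budget _
  unfold Spec_solution solution solution_alt
  rw [solLoopB_eq]
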